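-- pv_equiv track=rewrite | github.com/itay-raveh/wanderbound | backend/app/logic/layout/builder.py | _optimal_mixed_count
-- ===== SOURCE A (Python) =====
-- from math import ceil
--
-- def _portrait_page_count(n: int) -> int:
--     """Min pages for n portraits (page sizes 3, 2, 1)."""
--     return ceil(n / 3)
--
-- def _landscape_page_count(n: int) -> int:
--     """Min pages for n landscapes (page sizes 4, 3, 1)."""
--     return 2 if n == 2 else ceil(n / 4)
--
-- def _optimal_mixed_count(p: int, l: int) -> int:
--     """Find the number of 1P+2L pages that minimizes total page count."""
--     best_total = p + l
--     best_b = 0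
--
--     for b in range(min(p, l // 2) + 1):
--         total = b + _portrait_page_count(p - b) + _landscape_page_count(l - 2 * b)
--
--         if total < best_total:
--             best_total = total
--             best_b = b
--
--     return best_b
-- ===== SOURCE B (Python) =====
-- def _optimal_mixed_count(p: int, l: int) -> int:
--     """O(1): total(b+12) > total(b) always, so the first argmin lies in b in [0, 11]."""
--     hi = min(p, l // 2, 11)
--     if hi < 0:
--         return 0
--
--     def total(b):
--         lb = l - 2 * b
--         return b + (p - b + 2) // 3 + (2 if lb == 2 else (lb + 3) // 4)
--
--     return min(range(hi + 1), key=total)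
-- ===== Notes on version B (the rewrite author's own statement) =====
-- stated objective: faster
-- what changed: B replaces A's full scan of b = 0..min(p, l//2) by an O(1) min over the 12-value window b = 0..11, justified by total(b+12) > total(b) for every b, and computes ceilings by integer floor division instead of float math.
import Mathlib
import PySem

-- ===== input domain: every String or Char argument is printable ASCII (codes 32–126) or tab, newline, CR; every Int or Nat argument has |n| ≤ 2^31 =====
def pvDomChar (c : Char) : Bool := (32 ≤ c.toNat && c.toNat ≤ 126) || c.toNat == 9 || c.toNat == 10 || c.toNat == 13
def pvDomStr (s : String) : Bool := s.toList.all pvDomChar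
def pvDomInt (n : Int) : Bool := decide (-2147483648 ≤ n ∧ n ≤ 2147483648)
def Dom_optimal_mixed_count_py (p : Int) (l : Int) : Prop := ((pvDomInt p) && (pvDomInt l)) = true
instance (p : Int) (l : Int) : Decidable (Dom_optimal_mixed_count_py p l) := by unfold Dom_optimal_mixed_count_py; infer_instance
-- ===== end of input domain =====

-- B replaces A's O(min(p, l//2)) scan by an O(1) scan of the 12-value window [0,11]
-- (total(b+12) > total(b) always), returning the identical value everywhere.

-- ===== PORT A =====
-- ceil(n/3): Python computes ceil(n / 3) on a float; for |n| ≤ 2^31 this is exact and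
-- equals -((-n) // 3), which is what we port.
def portrait_page_count (n : Int) : Int := -(PySem.Int.floordiv (-n) 3)

-- 2 if n == 2 else ceil(n / 4)  (float ceil exact on the domain, ported as -((-n) // 4))
def landscape_page_count (n : Int) : Int :=
  if n = 2 then 2 else -(PySem.Int.floordiv (-n) 4)

def optimal_mixed_count_py (p : Int) (l : Int) : Int :=
  ((PySem.List.pyRange 0 (min p (PySem.Int.floordiv l 2) + 1) 1).foldl
    (fun (s : Int × Int) b =>
      let total := b + portrait_page_count (p - b) + landscape_page_count (l - 2 * b)
      if total < s.1 then (total, b) else s)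
    (p + l, 0)).2

-- ===== PORT B =====
-- Source B's local 'total(b)': ceil via floor division, (n+2)//3 and (n+3)//4
def pvAltTotal (p : Int) (l : Int) (b : Int) : Int :=
  let lb := l - 2 * b
  b + PySem.Int.floordiv (p - b + 2) 3 +
    (if lb = 2 then 2 else PySem.Int.floordiv (lb + 3) 4)

def optimal_mixed_count_py_alt (p : Int) (l : Int) : Int :=
  let hi := min (min p (PySem.Int.floordiv l 2)) 11
  if hi < 0 then 0
  else
    -- min(range(hi + 1), key=total); the range is nonempty here, so min? is some
    -- and the default 0 is never used
    (PySem.List.min? (PySem.List.pyRange 0 (hi + 1) 1) (pvAltTotal p l)).getD 0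

-- ===== PRECONDITION & SPEC =====
def Spec_optimal_mixed_count_py (p : Int) (l : Int) (out : Int) : Prop := out = optimal_mixed_count_py_alt p l
instance (p : Int) (l : Int) (out : Int) : Decidable (Spec_optimal_mixed_count_py p l out) := by unfold Spec_optimal_mixed_count_py; infer_instance

-- ===== CLAIM (what is proved, stated in full; the proofs are below) =====
def Claim_equal_optimal_mixed_count_py : Prop := ∀ (p : Int) (l : Int), Dom_optimal_mixed_count_py p l → Spec_optimal_mixed_count_py p l (optimal_mixed_count_py p l)

-- ===== LEMMAS AND PROOFS =====

-- A's loop body, abstracted over the objective function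
def pvStep (f : Int → Int) (s : Int × Int) (b : Int) : Int × Int :=
  if f b < s.1 then (f b, b) else s

-- A's objective at b
def pvTotal (p : Int) (l : Int) (b : Int) : Int :=
  b + portrait_page_count (p - b) + landscape_page_count (l - 2 * b)

-- ceil((n)/3) = (n+2)//3 and ceil(n/4) = (n+3)//4: A's and B's totals coincide
lemma pvTotal_eq_alt (p l b : Int) : pvTotal p l b = pvAltTotal p l b := by
  have h3 := PySem.Int.floordiv_mul_add_mod (-(p - b)) 3
  have h3n := PySem.Int.mod_nonneg (-(p - b)) (by norm_num : (0:Int) < 3)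
  have h3l := PySem.Int.mod_lt (-(p - b)) (by norm_num : (0:Int) < 3)
  have g3 := PySem.Int.floordiv_mul_add_mod (p - b + 2) 3
  have g3n := PySem.Int.mod_nonneg (p - b + 2) (by norm_num : (0:Int) < 3)
  have g3l := PySem.Int.mod_lt (p - b + 2) (by norm_num : (0:Int) < 3)
  have h4 := PySem.Int.floordiv_mul_add_mod (-(l - 2 * b)) 4
  have h4n := PySem.Int.mod_nonneg (-(l - 2 * b)) (by norm_num : (0:Int) < 4)
  have h4l := PySem.Int.mod_lt (-(l - 2 * b)) (by norm_num : (0:Int) < 4)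
  have g4 := PySem.Int.floordiv_mul_add_mod (l - 2 * b + 3) 4
  have g4n := PySem.Int.mod_nonneg (l - 2 * b + 3) (by norm_num : (0:Int) < 4)
  have g4l := PySem.Int.mod_lt (l - 2 * b + 3) (by norm_num : (0:Int) < 4)
  simp only [pvTotal, pvAltTotal, portrait_page_count, landscape_page_count]
  split_ifs <;> omega

-- growth: the objective increases strictly over a stride of 12
lemma pvTotal_add_twelve (p l b : Int) : pvTotal p l b + 1 ≤ pvTotal p l (b + 12) := by
  have h3 := PySem.Int.floordiv_mul_add_mod (-(p - b)) 3
  have h3n := PySem.Int.mod_nonneg (-(p - b)) (by norm_num : (0:Int) < 3)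
  have h3l := PySem.Int.mod_lt (-(p - b)) (by norm_num : (0:Int) < 3)
  have g3 := PySem.Int.floordiv_mul_add_mod (-(p - (b + 12))) 3
  have g3n := PySem.Int.mod_nonneg (-(p - (b + 12))) (by norm_num : (0:Int) < 3)
  have g3l := PySem.Int.mod_lt (-(p - (b + 12))) (by norm_num : (0:Int) < 3)
  have h4 := PySem.Int.floordiv_mul_add_mod (-(l - 2 * b)) 4
  have h4n := PySem.Int.mod_nonneg (-(l - 2 * b)) (by norm_num : (0:Int) < 4)
  have h4l := PySem.Int.mod_lt (-(l - 2 * b)) (by norm_num : (0:Int) < 4)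
  have g4 := PySem.Int.floordiv_mul_add_mod (-(l - 2 * (b + 12))) 4
  have g4n := PySem.Int.mod_nonneg (-(l - 2 * (b + 12))) (by norm_num : (0:Int) < 4)
  have g4l := PySem.Int.mod_lt (-(l - 2 * (b + 12))) (by norm_num : (0:Int) < 4)
  unfold pvTotal portrait_page_count landscape_page_count
  split_ifs <;> omega

-- folding A's step never increases the best total
lemma pvFold_fst_le (f : Int → Int) (L : List Int) :
    ∀ s : Int × Int, (L.foldl (pvStep f) s).1 ≤ s.1 := by
  induction L with
  | nil => intro s; simp
  | cons x t ih =>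
    intro s
    simp only [List.foldl_cons]
    have h1 := ih (pvStep f s x)
    have h2 : (pvStep f s x).1 ≤ s.1 := by
      unfold pvStep
      split_ifs with h
      · simpa using le_of_lt h
      · exact le_refl _
    omega

-- after processing c, the best total is ≤ f c
lemma pvFold_fst_le_mem (f : Int → Int) (L : List Int) :
    ∀ (s : Int × Int) (c : Int), c ∈ L → (L.foldl (pvStep f) s).1 ≤ f c := by
  induction L with
  | nil => intro s c h; simp at h
  | cons x t ih =>
    intro s c hc
    simp only [List.foldl_cons]
    rcases List.mem_cons.mp hc with h | h
    · subst h
      have h1 := pvFold_fst_le f t (pvStep f s c)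
      have h2 : (pvStep f s c).1 ≤ f c := by
        unfold pvStep; split_ifs <;> omega
      omega
    · exact ih _ c h

-- once the state dominates every earlier candidate, the rest of the scan is a no-op
lemma pvFold_tail_noop (p l : Int) (hi : Int) :
    ∀ (n : Nat) (b : Int), 12 ≤ b → (hi + 1 - b).toNat = n →
      ∀ s : Int × Int, (∀ c, 0 ≤ c → c < b → s.1 ≤ pvTotal p l c) →
      (PySem.List.pyRange b (hi + 1) 1).foldl (pvStep (pvTotal p l)) s = s := by
  intro n
  induction n with
  | zero =>
    intro b hb hn s hs
    rw [PySem.List.pyRange_one_eq_nil (by omega)]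
    rfl
  | succ m ih =>
    intro b hb hn s hs
    rw [PySem.List.pyRange_one_cons (by omega)]
    simp only [List.foldl_cons]
    have hgt : s.1 < pvTotal p l b := by
      have h1 := hs (b - 12) (by omega) (by omega)
      have h2 := pvTotal_add_twelve p l (b - 12)
      have : b - 12 + 12 = b := by ring
      rw [this] at h2
      omega
    have hstep : pvStep (pvTotal p l) s b = s := by
      unfold pvStep; split_ifs with h <;> [omega; rfl]
    rw [hstep]
    exact ih (b + 1) (by omega) (by omega) s
      (fun c h0 hc => by
        rcases lt_or_eq_of_le (Int.lt_add_one_iff.mp hc) with h | h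
        · exact hs c h0 h
        · subst h; omega)

-- A's fold, started at an exact current best (f m, m), computes min?'s first argmin
lemma pvFold_eq_min (f : Int → Int) (L : List Int) :
    ∀ m : Int,
      (L.foldl (pvStep f) (f m, m)).2 = (PySem.List.min? (m :: L) f).getD 0 := by
  induction L with
  | nil => intro m; rfl
  | cons x t ih =>
    intro m
    simp only [List.foldl_cons]
    by_cases h : f x < f m
    · have h1 : pvStep f (f m, m) x = (f x, x) := by unfold pvStep; simp [h]
      rw [h1, ih x]
      unfold PySem.List.min?
      simp only [List.foldl_cons]
      rw [if_pos h]
    · have h1 : pvStep f (f m, m) x = (f m, m) := by unfold pvStep; simp [h]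
      rw [h1, ih m]
      unfold PySem.List.min?
      simp only [List.foldl_cons]
      rw [if_neg h]

-- A's scan over a nonempty window [0, hi] starting from the sentinel (p+l, 0)
-- equals min(range(hi+1), key=total), provided total(0) ≤ p + l
lemma pvScan_eq (p l hi : Int) (hhi : 0 ≤ hi) (h0 : pvTotal p l 0 ≤ p + l) :
    ((PySem.List.pyRange 0 (hi + 1) 1).foldl (pvStep (pvTotal p l)) (p + l, 0)).2 =
      (PySem.List.min? (PySem.List.pyRange 0 (hi + 1) 1) (pvTotal p l)).getD 0 := by
  rw [PySem.List.pyRange_one_cons (by omega)]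
  simp only [List.foldl_cons, zero_add]
  have hfirst : pvStep (pvTotal p l) (p + l, 0) 0 = (pvTotal p l 0, 0) := by
    unfold pvStep
    split_ifs with h
    · rfl
    · have : pvTotal p l 0 = p + l := by omega
      rw [this]
  rw [hfirst]
  exact pvFold_eq_min (pvTotal p l) (PySem.List.pyRange 1 (hi + 1) 1) 0

-- total(0) ≤ p + l on the nonempty case (p ≥ 0, l ≥ 0)
lemma pvTotal_zero_le (p l : Int) (hp : 0 ≤ p) (hl : 0 ≤ l) : pvTotal p l 0 ≤ p + l := by
  have h3 := PySem.Int.floordiv_mul_add_mod (-(p - 0)) 3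
  have h3n := PySem.Int.mod_nonneg (-(p - 0)) (by norm_num : (0:Int) < 3)
  have h3l := PySem.Int.mod_lt (-(p - 0)) (by norm_num : (0:Int) < 3)
  have h4 := PySem.Int.floordiv_mul_add_mod (-(l - 2 * 0)) 4
  have h4n := PySem.Int.mod_nonneg (-(l - 2 * 0)) (by norm_num : (0:Int) < 4)
  have h4l := PySem.Int.mod_lt (-(l - 2 * 0)) (by norm_num : (0:Int) < 4)
  unfold pvTotal portrait_page_count landscape_page_count
  split_ifs <;> omega

-- l // 2 ≥ 0 ↔ l ≥ 0
lemma pvHalf_nonneg (l : Int) (h : 0 ≤ PySem.Int.floordiv l 2) : 0 ≤ l := by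
  have h2 := PySem.Int.floordiv_mul_add_mod l 2
  have h2n := PySem.Int.mod_nonneg l (by norm_num : (0:Int) < 2)
  omega

-- ===== VERDICT (by name: the statement is the Claim_ definition above) =====
theorem optimal_mixed_count_py_spec : Claim_equal_optimal_mixed_count_py := by
  intro p l _
  unfold Spec_optimal_mixed_count_py optimal_mixed_count_py optimal_mixed_count_py_alt
  set M := min p (PySem.Int.floordiv l 2) with hM
  by_cases hneg : M < 0
  · -- empty ranges on both sides
    rw [if_pos (by omega : min M 11 < 0)]
    rw [PySem.List.pyRange_one_eq_nil (by omega)]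
    rfl
  · replace hneg : 0 ≤ M := le_of_not_gt hneg
    have hp : 0 ≤ p := le_trans hneg (min_le_left _ _)
    have hl : 0 ≤ l := pvHalf_nonneg l (le_trans hneg (min_le_right _ _))
    have h0 := pvTotal_zero_le p l hp hl
    rw [if_neg (by omega : ¬ min M 11 < 0)]
    have hfold :
        ((PySem.List.pyRange 0 (M + 1) 1).foldl (pvStep (pvTotal p l)) (p + l, 0)).2 =
        ((PySem.List.pyRange 0 (min M 11 + 1) 1).foldl (pvStep (pvTotal p l)) (p + l, 0)).2 := by
      by_cases hbig : 12 ≤ M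
      · have hsplit : PySem.List.pyRange 0 (M + 1) 1 =
            PySem.List.pyRange 0 12 1 ++ PySem.List.pyRange 12 (M + 1) 1 :=
          PySem.List.pyRange_one_append 0 12 (M + 1) (by omega) (by omega)
        have hmin : min M 11 = 11 := by omega
        rw [hsplit, List.foldl_append, hmin]
        set s1 := (PySem.List.pyRange 0 12 1).foldl (pvStep (pvTotal p l)) (p + l, 0) with hs1
        have hdom : ∀ c, 0 ≤ c → c < 12 → s1.1 ≤ pvTotal p l c := by
          intro c h0c h12
          exact pvFold_fst_le_mem (pvTotal p l) _ _ c
            (PySem.List.mem_pyRange_one.mpr ⟨h0c, h12⟩)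
        rw [pvFold_tail_noop p l M (M + 1 - 12).toNat 12 (by omega) rfl s1 hdom]
        rw [hs1]
        norm_num
      · have hmin : min M 11 = M := by omega
        rw [hmin]
    -- A's body is pvStep/pvTotal definitionally
    have hA :
        ((PySem.List.pyRange 0 (M + 1) 1).foldl
          (fun (s : Int × Int) b =>
            let total := b + portrait_page_count (p - b) + landscape_page_count (l - 2 * b)
            if total < s.1 then (total, b) else s) (p + l, 0)).2 =
        ((PySem.List.pyRange 0 (M + 1) 1).foldl (pvStep (pvTotal p l)) (p + l, 0)).2 := rfl
    rw [hA, hfold, pvScan_eq p l (min M 11) (by omega) h0]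
    -- min? computes the same value with B's altTotal key
    have hkey : pvTotal p l = pvAltTotal p l := funext (fun b => pvTotal_eq_alt p l b)
    rw [hkey]
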